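-- pv_equiv track=rewrite | github.com/animeshokhade/dsa | scaler/Multiple left rotations of the array.py | solve
-- ===== SOURCE A (Python) =====
-- def solve(A, B):
--     iterations = len(B)
--     size = len(A)
--     ans = []
--     for iteration in range(iterations):
--         B[iteration] %= size
--         newArray = A[B[iteration]:] + A[:B[iteration]]
--         ans.append(newArray)
--     return ans
-- ===== SOURCE B (Python) =====
-- def solve(A, B):
--     size = len(A)
--     cache = {}
--     ans = []
--     for i in range(len(B)):
--         B[i] %= size
--         k = B[i]
--         if k not in cache:
--             cache[k] = [A[(k + j) % size] for j in range(size)]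
--         ans.append(cache[k])
--     return ans
-- ===== Notes on version B (the rewrite author's own statement) =====
-- stated objective: alternative
-- what changed: B replaces slice concatenation with an element-wise modular-index gather ([A[(k+j)%size] for j in range(size)]) and memoizes rotations in a dict keyed by the normalized shift, so duplicate queries are answered by a hash lookup instead of being rebuilt.
import Mathlib
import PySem

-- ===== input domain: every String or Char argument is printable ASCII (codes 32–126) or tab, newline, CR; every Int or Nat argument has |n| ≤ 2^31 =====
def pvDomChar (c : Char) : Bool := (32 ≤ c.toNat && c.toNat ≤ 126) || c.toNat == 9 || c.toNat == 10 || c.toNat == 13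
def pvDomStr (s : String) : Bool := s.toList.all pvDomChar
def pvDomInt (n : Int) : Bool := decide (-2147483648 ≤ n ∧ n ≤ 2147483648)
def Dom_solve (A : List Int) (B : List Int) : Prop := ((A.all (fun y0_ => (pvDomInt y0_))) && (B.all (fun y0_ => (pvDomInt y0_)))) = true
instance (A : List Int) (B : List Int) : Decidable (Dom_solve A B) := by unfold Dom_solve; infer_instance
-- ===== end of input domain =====

-- B builds each rotation by an element-wise modular-index gather instead of concatenating two
-- slices, and memoizes the rotations in a dict keyed by the normalized shift (objective:
-- alternative; duplicate shifts become a lookup). Both A and B mutate the argument list B in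
-- place (B[i] %= size); the equivalence proved here is about the return value only (the
-- in-place mutation is identical in both).

-- ===== PORT A =====
def solve (A : List Int) (B : List Int) : List (List Int) :=
  let size : Int := A.length
  ((List.range B.length).foldl
    (fun (st : List Int × List (List Int)) (iteration : Nat) =>
      let b := PySem.Int.mod ((PySem.List.pyGet? st.1 (iteration : Int)).getD 0) size
      let B' := st.1.set iteration b
      let newArray := PySem.List.slice A (some b) none ++ PySem.List.slice A none (some b)
      (B', st.2 ++ [newArray]))
    (B, [])).2

-- ===== PORT B =====
def solve_alt (A : List Int) (B : List Int) : List (List Int) :=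
  let size : Int := A.length
  ((List.range B.length).foldl
    (fun (st : List Int × PySem.Dict Int (List Int) × List (List Int)) (i : Nat) =>
      let k := PySem.Int.mod ((PySem.List.pyGet? st.1 (i : Int)).getD 0) size
      let B' := st.1.set i k
      let cache :=
        if st.2.1.contains k then st.2.1
        else st.2.1.insert k
          ((List.range A.length).map
            (fun (j : Nat) => (PySem.List.pyGet? A (PySem.Int.mod (k + (j : Int)) size)).getD 0))
      (B', cache, st.2.2 ++ [(cache.get? k).getD []]))
    (B, PySem.Dict.empty, [])).2.2

-- ===== PRECONDITION & SPEC =====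
-- Python raises ZeroDivisionError (B[i] %= 0) when A is empty and B is nonempty, in both programs.
def Pre_solve (A : List Int) (B : List Int) : Prop := A ≠ [] ∨ B = []
instance (A : List Int) (B : List Int) : Decidable (Pre_solve A B) := by unfold Pre_solve; infer_instance
def pvWitness_solve : List Int × List Int := ([1, 2, 3], [1, 4])
def Spec_solve (A : List Int) (B : List Int) (out : List (List Int)) : Prop := out = solve_alt A B
instance (A : List Int) (B : List Int) (out : List (List Int)) : Decidable (Spec_solve A B out) := by unfold Spec_solve; infer_instance

-- ===== CLAIM (what is proved, stated in full; the proofs are below) =====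
def Claim_equal_solve : Prop := ∀ (A : List Int) (B : List Int), Dom_solve A B → Pre_solve A B → Spec_solve A B (solve A B)

-- ===== LEMMAS AND PROOFS =====

-- the canonical rotation by m positions, 0 ≤ m ≤ |A|
def rotDT (A : List Int) (m : Nat) : List Int := A.drop m ++ A.take m

-- A's two-slice concatenation is the canonical rotation
lemma slices_eq_rot (A : List Int) (k : Int) (h0 : 0 ≤ k) :
    PySem.List.slice A (some k) none ++ PySem.List.slice A none (some k) = rotDT A k.toNat := by
  rw [PySem.List.slice_from _ h0, PySem.List.slice_to _ h0, rotDT]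

-- B's modular gather is the canonical rotation when 0 ≤ k < |A|
lemma gather_eq_rot (A : List Int) (k : Int) (h0 : 0 ≤ k) (h1 : k < (A.length : Int)) :
    (List.range A.length).map
        (fun (j : Nat) => (PySem.List.pyGet? A (PySem.Int.mod (k + (j : Int)) (A.length : Int))).getD 0)
      = rotDT A k.toNat := by
  set n := A.length with hn
  have hm : k.toNat < n := by omega
  apply List.ext_getElem
  · simp [rotDT]; omega
  · intro i hi hi'
    simp only [List.length_map, List.length_range] at hi
    rw [List.getElem_map, List.getElem_range]
    have hmod : PySem.Int.mod (k + (i : Int)) (n : Int) = (((k.toNat + i) % n : Nat) : Int) := by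
      rw [show k + (i : Int) = ((k.toNat + i : Nat) : Int) by omega, PySem.Int.mod_natCast]
    have hlt : (k.toNat + i) % n < n := Nat.mod_lt _ (by omega)
    rw [hmod, PySem.List.pyGet?_natCast]
    rw [List.getElem?_eq_getElem (by omega)]
    simp only [Option.getD_some, rotDT]
    by_cases hc : i < n - k.toNat
    · have hmod : (k.toNat + i) % n = k.toNat + i := Nat.mod_eq_of_lt (by omega)
      rw [List.getElem_append_left (by simp; omega)]
      simp only [hmod, List.getElem_drop]
    · have hmod : (k.toNat + i) % n = k.toNat + i - n := by
        have h2 : k.toNat + i < 2 * n := by omega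
        rw [Nat.mod_eq_sub_mod (by omega), Nat.mod_eq_of_lt (by omega)]
      rw [List.getElem_append_right (by simp; omega)]
      simp only [hmod, List.getElem_take]
      congr 1
      simp
      omega

-- cache invariant: every stored value is the canonical rotation of its (in-range) key
def CacheOK (A : List Int) (d : PySem.Dict Int (List Int)) : Prop :=
  ∀ k v, d.get? k = some v → 0 ≤ k ∧ k < (A.length : Int) ∧ v = rotDT A k.toNat

-- the two folds produce the same answer list, step by step, when A is nonempty
lemma fold_eq (A : List Int) (hA : A ≠ []) (l : List Nat) (bs : List Int)
    (d : PySem.Dict Int (List Int)) (hd : CacheOK A d) (ans : List (List Int)) :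
    (l.foldl
      (fun (st : List Int × List (List Int)) (iteration : Nat) =>
        let b := PySem.Int.mod ((PySem.List.pyGet? st.1 (iteration : Int)).getD 0) (A.length : Int)
        (st.1.set iteration b,
         st.2 ++ [PySem.List.slice A (some b) none ++ PySem.List.slice A none (some b)]))
      (bs, ans)).2
    = (l.foldl
      (fun (st : List Int × PySem.Dict Int (List Int) × List (List Int)) (i : Nat) =>
        let k := PySem.Int.mod ((PySem.List.pyGet? st.1 (i : Int)).getD 0) (A.length : Int)
        let cache :=
          if st.2.1.contains k then st.2.1
          else st.2.1.insert k
            ((List.range A.length).map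
              (fun (j : Nat) => (PySem.List.pyGet? A (PySem.Int.mod (k + (j : Int)) (A.length : Int))).getD 0))
        (st.1.set i k, cache, st.2.2 ++ [(cache.get? k).getD []]))
      (bs, d, ans)).2.2 := by
  have hpos : (0 : Int) < (A.length : Int) := by
    have : A.length ≠ 0 := fun h => hA (List.eq_nil_of_length_eq_zero h)
    omega
  induction l generalizing bs d ans with
  | nil => rfl
  | cons x xs ih =>
      simp only [List.foldl_cons]
      set k := PySem.Int.mod ((PySem.List.pyGet? bs (x : Int)).getD 0) (A.length : Int) with hk
      have hk0 : 0 ≤ k := PySem.Int.mod_nonneg _ hpos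
      have hk1 : k < (A.length : Int) := PySem.Int.mod_lt _ hpos
      set g := (List.range A.length).map
          (fun (j : Nat) => (PySem.List.pyGet? A (PySem.Int.mod (k + (j : Int)) (A.length : Int))).getD 0) with hg
      by_cases hc : d.contains k
      · obtain ⟨v, hv⟩ : ∃ v, d.get? k = some v := by
          cases h : d.get? k with
          | none => exact absurd ((PySem.Dict.get?_eq_none_iff_contains d k).mp h) (by simpa using hc)
          | some v => exact ⟨v, rfl⟩
        have hvr := (hd k v hv).2.2
        simp only [hc, if_true, hv, Option.getD_some]
        rw [slices_eq_rot A k hk0, hvr]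
        exact ih _ d hd _
      · simp only [hc, Bool.false_eq_true, if_false]
        rw [PySem.Dict.get?_insert_self, Option.getD_some]
        rw [slices_eq_rot A k hk0, hg, gather_eq_rot A k hk0 hk1]
        apply ih
        intro k' v' hv'
        by_cases hkk : k' = k
        · subst hkk
          rw [PySem.Dict.get?_insert_self, Option.some_inj] at hv'
          refine ⟨hk0, hk1, ?_⟩
          rw [← hv']
        · rw [PySem.Dict.get?_insert_of_ne _ _ (by simpa using hkk)] at hv'
          exact hd k' v' hv'

-- ===== VERDICT (by name: the statement is the Claim_ definition above) =====
theorem solve_spec : Claim_equal_solve := by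
  intro A B _ hpre
  unfold Spec_solve solve solve_alt
  rcases hpre with hA | hB
  · simp only []
    exact fold_eq A hA _ B PySem.Dict.empty (fun k v h => by simp [PySem.Dict.get?, PySem.Dict.empty] at h) []
  · subst hB; rfl
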